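-- pv_equiv track=rewrite | github.com/anderscui/algorithm | py/leetcode/ugly_number_264.py | get_next_ugly
-- ===== SOURCE A (Python) =====
-- def get_next_ugly(known_ugly: list):
--     cur_max = known_ugly[-1]
--     possible = []
--     # 可能的下一个必然来自于已知的数乘以某一个素数，且只可能是其中的第一个
--     for p in [2, 3, 5]:
--         for i in known_ugly:
--             if i * p > cur_max:
--                 possible.append(i * p)
--                 break
--     return min(possible)
-- ===== SOURCE B (Python) =====
-- def get_next_ugly(known_ugly: list):
--     # One traversal: collect the first candidate for every prime at once,
--     # stopping as soon as all three are known (A scans the list three times).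
--     cur_max = known_ugly[-1]
--     c2 = c3 = c5 = None
--     for i in known_ugly:
--         if c2 is None and i * 2 > cur_max:
--             c2 = i * 2
--         if c3 is None and i * 3 > cur_max:
--             c3 = i * 3
--         if c5 is None and i * 5 > cur_max:
--             c5 = i * 5
--         if c2 is not None and c3 is not None and c5 is not None:
--             break
--     return min(c for c in (c2, c3, c5) if c is not None)
-- ===== Notes on version B (the rewrite author's own statement) =====
-- stated objective: alternative
-- what changed: B finds the first candidate for all three primes in a single traversal of the list with an early exit once all three are known (tracked in three Option-like slots), instead of A's three separate inner scans, and takes the minimum of the found candidates directly instead of building a list.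
import Mathlib
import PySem

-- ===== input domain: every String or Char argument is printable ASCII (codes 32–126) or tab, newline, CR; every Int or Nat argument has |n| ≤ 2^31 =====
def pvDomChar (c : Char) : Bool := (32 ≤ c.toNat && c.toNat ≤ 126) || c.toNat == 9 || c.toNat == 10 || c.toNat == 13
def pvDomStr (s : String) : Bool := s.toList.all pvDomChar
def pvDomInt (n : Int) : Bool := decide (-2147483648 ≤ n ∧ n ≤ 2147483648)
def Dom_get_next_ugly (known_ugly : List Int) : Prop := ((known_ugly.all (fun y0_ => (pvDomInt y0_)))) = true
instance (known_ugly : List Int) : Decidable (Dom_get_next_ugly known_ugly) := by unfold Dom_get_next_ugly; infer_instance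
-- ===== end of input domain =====

-- B collects the first candidate for all three primes in one traversal (with early exit)
-- instead of A's three separate scans; same O(n) cost, different structure.

-- ===== PORT A =====
-- inner 'for i in known_ugly: if i*p>cur_max: append; break' — first i with i*p>cur_max, times p
def pvScanA (m p : Int) : List Int → Option Int
  | [] => none
  | i :: rest => if m < i * p then some (i * p) else pvScanA m p rest

def get_next_ugly (known_ugly : List Int) : Int :=
  match PySem.List.pyGet? known_ugly (-1) with   -- known_ugly[-1]; none = IndexError (outside Pre_)
  | none => 0
  | some cur_max =>
    let possible := [2, 3, 5].foldl (fun acc p =>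
      match pvScanA cur_max p known_ugly with
      | some v => acc ++ [v]
      | none => acc) ([] : List Int)
    match PySem.List.min? possible (fun x => x) with  -- min(possible); none = ValueError (outside Pre_)
    | some v => v
    | none => 0

-- ===== PORT B =====
-- Source B's single loop: the three slots c2/c3/c5 (None = not found yet), filled on the first
-- element whose product exceeds cur_max; the loop breaks once all three are filled
def pvScanB (m : Int) : List Int → Option Int × Option Int × Option Int → Option Int × Option Int × Option Int
  | [], st => st
  | i :: rest, (c2, c3, c5) =>
    let c2' := match c2 with
      | none => if m < i * 2 then some (i * 2) else none
      | some v => some v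
    let c3' := match c3 with
      | none => if m < i * 3 then some (i * 3) else none
      | some v => some v
    let c5' := match c5 with
      | none => if m < i * 5 then some (i * 5) else none
      | some v => some v
    if c2'.isSome ∧ c3'.isSome ∧ c5'.isSome then (c2', c3', c5')
    else pvScanB m rest (c2', c3', c5')

def get_next_ugly_alt (known_ugly : List Int) : Int :=
  match PySem.List.pyGet? known_ugly (-1) with   -- known_ugly[-1]; none = IndexError (outside Pre_)
  | none => 0
  | some cur_max =>
    let (c2, c3, c5) := pvScanB cur_max known_ugly (none, none, none)
    -- min(c for c in (c2, c3, c5) if c is not None); none = ValueError (outside Pre_)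
    match PySem.List.min? (([c2, c3, c5] : List (Option Int)).filterMap id) (fun x => x) with
    | some v => v
    | none => 0

-- ===== PRECONDITION & SPEC =====
-- Pre_ excludes exactly the inputs on which A raises: the empty list (IndexError on known_ugly[-1])
-- and lists where no element's product with 2, 3 or 5 exceeds the last element (ValueError: min of
-- an empty list); B raises on exactly the same inputs.
def Pre_get_next_ugly (known_ugly : List Int) : Prop :=
  known_ugly ≠ [] ∧ ∃ i ∈ known_ugly,
    (known_ugly.getLastD 0 < i * 2 ∨ known_ugly.getLastD 0 < i * 3 ∨ known_ugly.getLastD 0 < i * 5)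
instance (known_ugly : List Int) : Decidable (Pre_get_next_ugly known_ugly) := by
  unfold Pre_get_next_ugly; infer_instance

def pvWitness_get_next_ugly : List Int := [3, 1, 4, 1, 5]

def Spec_get_next_ugly (known_ugly : List Int) (out : Int) : Prop := out = get_next_ugly_alt known_ugly
instance (known_ugly : List Int) (out : Int) : Decidable (Spec_get_next_ugly known_ugly out) := by
  unfold Spec_get_next_ugly; infer_instance

-- ===== CLAIM (what is proved, stated in full; the proofs are below) =====
def Claim_equal_get_next_ugly : Prop := ∀ (known_ugly : List Int), Dom_get_next_ugly known_ugly → Pre_get_next_ugly known_ugly → Spec_get_next_ugly known_ugly (get_next_ugly known_ugly)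

-- ===== LEMMAS AND PROOFS =====

-- 'slot kept if already filled, else A's first match': the slot's value at the end of B's loop
def pvOr (a b : Option Int) : Option Int :=
  match a with
  | none => b
  | some v => some v

-- B's loop computes, in each slot, the value it had on entry or else A's first match for that prime
theorem pv_scanB_eq (m : Int) : ∀ (xs : List Int) (c2 c3 c5 : Option Int),
    pvScanB m xs (c2, c3, c5) =
      (pvOr c2 (pvScanA m 2 xs), pvOr c3 (pvScanA m 3 xs), pvOr c5 (pvScanA m 5 xs)) := by
  intro xs
  induction xs with
  | nil => intro c2 c3 c5; cases c2 <;> cases c3 <;> cases c5 <;> rfl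
  | cons i rest ih =>
    intro c2 c3 c5
    simp only [pvScanB, pvScanA]
    rcases c2 with _ | v2 <;> rcases c3 with _ | v3 <;> rcases c5 with _ | v5 <;>
      simp only [pvOr] <;>
      split_ifs <;>
      simp_all [pvOr, Option.isSome]

theorem pv_get_last (xs : List Int) (h : xs ≠ []) : PySem.List.pyGet? xs (-1) = some (xs.getLastD 0) := by
  have hl : 1 ≤ xs.length := List.length_pos_iff.mpr h
  simp [PySem.List.pyGet?, PySem.List.pyIdx?, hl]
  rw [List.getElem?_eq_getElem (by omega)]
  simp [List.getLast?_eq_getElem?, List.getElem?_eq_getElem (show xs.length - 1 < xs.length by omega)]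

-- ===== VERDICT (by name: the statement is the Claim_ definition above) =====
theorem get_next_ugly_spec : Claim_equal_get_next_ugly := by
  intro xs hdom hpre
  obtain ⟨hne, -⟩ := hpre
  unfold Spec_get_next_ugly get_next_ugly get_next_ugly_alt
  rw [pv_get_last xs hne]
  simp only [pv_scanB_eq, pvOr, List.foldl_cons, List.foldl_nil]
  rcases h2 : pvScanA (xs.getLastD 0) 2 xs with _ | v2 <;>
    rcases h3 : pvScanA (xs.getLastD 0) 3 xs with _ | v3 <;>
      rcases h5 : pvScanA (xs.getLastD 0) 5 xs with _ | v5 <;>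
        simp only [List.filterMap, id, List.nil_append, List.cons_append]
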